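-- pv_equiv track=rewrite | github.com/Shurc1val/advent-of-code-2023 | day_11.py | expand_universe
-- ===== SOURCE A (Python) =====
-- def expand_universe(universe: list[list[str]]):
--     rows_to_repeat = []
--     for i, row in enumerate(universe):
--         if all([place == '.' for place in row]):
--             rows_to_repeat.append(i)
--     for i, index in enumerate(rows_to_repeat):
--         adj_index = index + i
--         universe = universe[:adj_index + 1] + universe[adj_index:]
--
--     columns_to_repeat = []
--     for i, column in enumerate([[row[i] for row in universe] for i in range(len(universe[0]))]):
--         if all([place == '.' for place in column]):
--             columns_to_repeat.append(i)
--     for i, index in enumerate(columns_to_repeat):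
--         adj_index = index + i
--         for i in range(len(universe)):
--             universe[i] = universe[i][:adj_index + 1] + universe[i][adj_index:]
--
--     return universe
-- ===== SOURCE B (Python) =====
-- def expand_universe(universe: list[list[str]]):
--     ncols = len(universe[0])
--     empty_cols = frozenset(j for j in range(ncols)
--                            if all(row[j] == '.' for row in universe))
--
--     def expand_row(row):
--         return [c for j, ch in enumerate(row)
--                   for c in ([ch, ch] if j in empty_cols else [ch])]
--
--     return [new for row in universe
--                 for new in ([expand_row(row), expand_row(row)]
--                             if all(place == '.' for place in row)
--                             else [expand_row(row)])]
-- ===== Notes on version B (the rewrite author's own statement) =====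
-- stated objective: faster
-- what changed: A repeatedly rebuilds the whole grid by slicing once per empty row and once per empty column; B scans the original grid once for empty rows/columns and emits the expanded grid directly in a single pass (frozenset membership for column indices).
import Mathlib
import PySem

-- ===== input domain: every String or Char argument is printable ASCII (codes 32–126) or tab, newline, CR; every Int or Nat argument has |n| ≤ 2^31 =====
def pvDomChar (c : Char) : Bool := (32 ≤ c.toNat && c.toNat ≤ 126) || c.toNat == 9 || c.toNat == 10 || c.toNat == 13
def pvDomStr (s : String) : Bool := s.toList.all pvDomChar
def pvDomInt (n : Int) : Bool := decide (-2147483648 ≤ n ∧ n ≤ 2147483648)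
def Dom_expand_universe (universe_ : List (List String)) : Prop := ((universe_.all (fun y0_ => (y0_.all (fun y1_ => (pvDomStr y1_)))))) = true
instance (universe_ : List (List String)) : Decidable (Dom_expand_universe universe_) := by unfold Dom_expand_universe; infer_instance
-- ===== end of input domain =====

-- B finds the empty rows/columns in one scan of the original grid and builds the expanded grid
-- directly in a single pass, instead of A's repeated whole-grid slicing per empty row/column.
-- Return-value equivalence only: A rebinds/overwrites its local list, B builds a fresh one.

-- ===== PORT A =====
-- the two 'collect indices of all-"." lines' loops (rows and columns both have type List (List String))
def pvCollectA (lines : List (List String)) (i : Int) : List Int :=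
  match lines with
  | [] => []
  | r :: rest =>
    if r.all (fun place => place == ".") then i :: pvCollectA rest (i + 1)
    else pvCollectA rest (i + 1)

-- 'for i, index in enumerate(rows_to_repeat): adj = index + i; universe = universe[:adj+1] + universe[adj:]'
def pvApplyRowDupsA {α : Type} (u : List α) (idxs : List Int) (i : Int) : List α :=
  match idxs with
  | [] => u
  | index :: rest =>
    let adj := index + i
    pvApplyRowDupsA (PySem.List.slice u none (some (adj + 1)) ++ PySem.List.slice u (some adj) none) rest (i + 1)

-- the column-duplication loop: each step rewrites every row of the grid
def pvApplyColDupsA (u : List (List String)) (idxs : List Int) (i : Int) : List (List String) :=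
  match idxs with
  | [] => u
  | index :: rest =>
    let adj := index + i
    pvApplyColDupsA (u.map (fun row => PySem.List.slice row none (some (adj + 1)) ++ PySem.List.slice row (some adj) none)) rest (i + 1)

def expand_universe (universe_ : List (List String)) : List (List String) :=
  let u1 := pvApplyRowDupsA universe_ (pvCollectA universe_ 0) 0
  -- [[row[i] for row in universe] for i in range(len(universe[0]))]; row[i] is exact under Pre_ (index in range)
  let columns := (PySem.List.pyRange 0 (((u1.headD []).length : Int)) 1).map
      (fun i => u1.map (fun row => PySem.List.pyGetD row i ""))
  pvApplyColDupsA u1 (pvCollectA columns 0) 0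

-- ===== PORT B =====
-- '[c for j, ch in enumerate(row) for c in ([ch, ch] if j in empty_cols else [ch])]'
def pvExpandRowB (empty_cols : List Int) (row : List String) : List String :=
  (PySem.List.enumerate row 0).flatMap (fun p => if p.1 ∈ empty_cols then [p.2, p.2] else [p.2])

def expand_universe_alt (universe_ : List (List String)) : List (List String) :=
  let ncols : Int := ((universe_.headD []).length : Int)
  let empty_cols := PySem.Set.ofList ((PySem.List.pyRange 0 ncols 1).filter
      (fun j => universe_.all (fun row => PySem.List.pyGetD row j "" == ".")))
  universe_.flatMap (fun row =>
    if row.all (fun place => place == ".") then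
      [pvExpandRowB empty_cols row, pvExpandRowB empty_cols row]
    else [pvExpandRowB empty_cols row])

-- ===== PRECONDITION & SPEC =====
-- Pre_ excludes exactly the inputs on which the Python A raises IndexError: the empty grid
-- (universe[0]) and grids with some row shorter than the first row (row[i] in the column pass).
def Pre_expand_universe (universe_ : List (List String)) : Prop :=
  universe_ ≠ [] ∧ ∀ row ∈ universe_, (universe_.headD []).length ≤ row.length

instance (universe_ : List (List String)) : Decidable (Pre_expand_universe universe_) := by
  unfold Pre_expand_universe; infer_instance

def pvWitness_expand_universe : List (List String) :=
  [[".", "#", "."], [".", ".", "."]]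

def Spec_expand_universe (universe_ : List (List String)) (out : List (List String)) : Prop := out = expand_universe_alt universe_
instance (universe_ : List (List String)) (out : List (List String)) : Decidable (Spec_expand_universe universe_ out) := by unfold Spec_expand_universe; infer_instance

-- ===== CLAIM (what is proved, stated in full; the proofs are below) =====
def Claim_equal_expand_universe : Prop := ∀ (universe_ : List (List String)), Dom_expand_universe universe_ → Pre_expand_universe universe_ → Spec_expand_universe universe_ (expand_universe universe_)

-- ===== LEMMAS AND PROOFS =====

-- proof-side normal form: duplicate the element at each (0-based) index of idxs
def gDupIdx {α : Type} (xs : List α) (idxs : List Int) : List α :=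
  match xs with
  | [] => []
  | x :: t => (if (0 : Int) ∈ idxs then [x, x] else [x]) ++ gDupIdx t (idxs.map (· - 1))

theorem pvApplyRowDupsA_nil {α : Type} (idxs : List Int) (i : Int) :
    pvApplyRowDupsA ([] : List α) idxs i = [] := by
  induction idxs generalizing i with
  | nil => rfl
  | cons j rest ih => simp [pvApplyRowDupsA, PySem.List.slice, ih]

-- shifting every index by one = starting the enumerate counter one later
theorem pvApplyRowDupsA_shift {α : Type} (idxs : List Int) (u : List α) (i : Int) :
    pvApplyRowDupsA u (idxs.map (· + 1)) i = pvApplyRowDupsA u idxs (i + 1) := by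
  induction idxs generalizing u i with
  | nil => rfl
  | cons j rest ih =>
    simp only [List.map_cons, pvApplyRowDupsA]
    have h1 : j + 1 + i = j + (i + 1) := by ring
    rw [h1, ih]

-- peeling one leading element off both the list and every (shifted) index
theorem pvApplyRowDupsA_cons {α : Type} (idxs : List Int) (a : α) (u : List α) (i : Int)
    (h : ∀ j ∈ idxs, 0 ≤ j + i) :
    pvApplyRowDupsA (a :: u) (idxs.map (· + 1)) i = a :: pvApplyRowDupsA u idxs i := by
  induction idxs generalizing u i with
  | nil => rfl
  | cons j rest ih =>
    have hj : 0 ≤ j + i := h j (List.mem_cons_self ..)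
    simp only [List.map_cons, pvApplyRowDupsA]
    have e1 : PySem.List.slice (a :: u) none (some (j + 1 + i + 1)) =
        a :: PySem.List.slice u none (some (j + i + 1)) := by
      rw [PySem.List.slice_to _ (by omega), PySem.List.slice_to _ (by omega)]
      have : (j + 1 + i + 1).toNat = (j + i + 1).toNat + 1 := by omega
      rw [this, List.take_succ_cons]
    have e2 : PySem.List.slice (a :: u) (some (j + 1 + i)) none =
        PySem.List.slice u (some (j + i)) none := by
      rw [PySem.List.slice_from _ (by omega), PySem.List.slice_from _ (by omega)]
      have : (j + 1 + i).toNat = (j + i).toNat + 1 := by omega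
      rw [this, List.drop_succ_cons]
    rw [e1, e2, List.cons_append]
    exact ih _ _ (fun k hk => by have := h k (List.mem_cons_of_mem _ hk); omega)

theorem gDupIdx_nil_idxs {α : Type} (xs : List α) : gDupIdx xs [] = xs := by
  induction xs with
  | nil => rfl
  | cons x t ih => simp [gDupIdx, ih]

theorem gDupIdx_neg_cons {α : Type} (xs : List α) (j : Int) (idxs : List Int) (hj : j < 0) :
    gDupIdx xs (j :: idxs) = gDupIdx xs idxs := by
  induction xs generalizing j idxs with
  | nil => rfl
  | cons x t ih =>
    simp only [gDupIdx, List.map_cons, List.mem_cons]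
    rw [ih (j - 1) _ (by omega)]
    have : ((0 : Int) = j ∨ (0 : Int) ∈ idxs) ↔ (0 : Int) ∈ idxs := by
      constructor
      · rintro (h | h)
        · omega
        · exact h
      · exact Or.inr
    simp [this]

theorem map_sub_one_map_add_one (l : List Int) : (l.map (· + 1)).map (· - 1) = l := by
  simp [List.map_map, Function.comp_def]

theorem map_add_one_map_sub_one (l : List Int) : (l.map (· - 1)).map (· + 1) = l := by
  simp [List.map_map, Function.comp_def]

-- the slice-insertion loop, started at counter 0 on a <-sorted list of nonnegative indices,
-- duplicates exactly the elements at those indices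
theorem pvApplyRowDupsA_eq_gDupIdx {α : Type} (xs : List α) (idxs : List Int)
    (hs : idxs.Pairwise (· < ·)) (hn : ∀ j ∈ idxs, 0 ≤ j) :
    pvApplyRowDupsA xs idxs 0 = gDupIdx xs idxs := by
  induction xs generalizing idxs with
  | nil => rw [pvApplyRowDupsA_nil]; rfl
  | cons x t ih =>
    match idxs, hs, hn with
    | [], _, _ => rw [gDupIdx_nil_idxs]; rfl
    | j :: rest, hs, hn =>
      have hlt : ∀ k ∈ rest, j < k := (List.pairwise_cons.mp hs).1
      have hps : rest.Pairwise (· < ·) := (List.pairwise_cons.mp hs).2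
      have hj0 : 0 ≤ j := hn j (List.mem_cons_self ..)
      by_cases hj : j = 0
      · subst hj
        have hr1 : ∀ k ∈ rest, 1 ≤ k := fun k hk => by have := hlt k hk; omega
        -- rest', the indices as seen one position later
        have hre : (rest.map (· - 1)).map (· + 1) = rest := map_add_one_map_sub_one rest
        have hstep : pvApplyRowDupsA (x :: t) (0 :: rest) 0 =
            pvApplyRowDupsA (x :: x :: t) rest 1 := by
          simp only [pvApplyRowDupsA]
          congr 1
          rw [show ((0 : Int) + 0 + 1) = (((1 : Nat) : Int)) by simp,
              show ((0 : Int) + 0) = (((0 : Nat) : Int)) by simp,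
              PySem.List.slice_to_natCast, PySem.List.slice_from_natCast]
          simp
        have h1 : pvApplyRowDupsA (x :: x :: t) rest 1 =
            pvApplyRowDupsA (x :: x :: t) (rest.map (· + 1)) 0 := by
          rw [pvApplyRowDupsA_shift]
          norm_num
        have h2 : pvApplyRowDupsA (x :: x :: t) (rest.map (· + 1)) 0 =
            x :: pvApplyRowDupsA (x :: t) rest 0 :=
          pvApplyRowDupsA_cons rest x (x :: t) 0 (fun k hk => by have := hr1 k hk; omega)
        have h3 : pvApplyRowDupsA (x :: t) rest 0 =
            x :: pvApplyRowDupsA t (rest.map (· - 1)) 0 := by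
          conv_lhs => rw [← hre]
          exact pvApplyRowDupsA_cons _ x t 0 (fun k hk => by
            rcases List.mem_map.mp hk with ⟨m, hm, rfl⟩
            have := hr1 m hm; omega)
        have h4 : pvApplyRowDupsA t (rest.map (· - 1)) 0 = gDupIdx t (rest.map (· - 1)) := by
          apply ih
          · exact (List.pairwise_map.mpr (hps.imp (by intro a b hab; omega)))
          · intro k hk
            rcases List.mem_map.mp hk with ⟨m, hm, rfl⟩
            have := hr1 m hm; omega
        rw [hstep, h1, h2, h3, h4]
        simp only [gDupIdx, List.mem_cons, List.map_cons]
        rw [gDupIdx_neg_cons _ _ _ (by omega : (0:Int) - 1 < 0)]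
        simp
      · -- j ≥ 1, so every index is ≥ 1: the head is kept as is
        have hall1 : ∀ k ∈ j :: rest, 1 ≤ k := by
          intro k hk
          rcases List.mem_cons.mp hk with rfl | hk
          · omega
          · have := hlt k hk; omega
        have hre : ((j :: rest).map (· - 1)).map (· + 1) = j :: rest :=
          map_add_one_map_sub_one _
        have h1 : pvApplyRowDupsA (x :: t) (j :: rest) 0 =
            x :: pvApplyRowDupsA t ((j :: rest).map (· - 1)) 0 := by
          conv_lhs => rw [← hre]
          exact pvApplyRowDupsA_cons _ x t 0 (fun k hk => by
            rcases List.mem_map.mp hk with ⟨m, hm, rfl⟩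
            have := hall1 m hm; omega)
        have h2 : pvApplyRowDupsA t ((j :: rest).map (· - 1)) 0 =
            gDupIdx t ((j :: rest).map (· - 1)) := by
          apply ih
          · exact List.pairwise_map.mpr (hs.imp (by intro a b hab; omega))
          · intro k hk
            rcases List.mem_map.mp hk with ⟨m, hm, rfl⟩
            have := hall1 m hm; omega
        rw [h1, h2]
        have h0 : (0 : Int) ∉ j :: rest := fun h => by have := hall1 0 h; omega
        simp only [gDupIdx, if_neg h0]
        rfl

theorem pvApplyColDupsA_map (u : List (List String)) (idxs : List Int) (i : Int) :
    pvApplyColDupsA u idxs i = u.map (fun row => pvApplyRowDupsA row idxs i) := by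
  induction idxs generalizing u i with
  | nil => simp [pvApplyColDupsA, pvApplyRowDupsA]
  | cons j rest ih =>
    simp only [pvApplyColDupsA]
    rw [ih, List.map_map]
    rfl

theorem pvCollectA_nonneg (lines : List (List String)) (n : Int) :
    ∀ j ∈ pvCollectA lines n, n ≤ j := by
  induction lines generalizing n with
  | nil => simp [pvCollectA]
  | cons r rest ih =>
    intro j hj
    simp only [pvCollectA] at hj
    split at hj
    · rcases List.mem_cons.mp hj with rfl | hj
      · omega
      · have := ih (n + 1) j hj; omega
    · have := ih (n + 1) j hj; omega

theorem pvCollectA_pairwise (lines : List (List String)) (n : Int) :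
    (pvCollectA lines n).Pairwise (· < ·) := by
  induction lines generalizing n with
  | nil => simp [pvCollectA]
  | cons r rest ih =>
    simp only [pvCollectA]
    split
    · exact List.pairwise_cons.mpr
        ⟨fun k hk => by have := pvCollectA_nonneg rest (n + 1) k hk; omega, ih (n + 1)⟩
    · exact ih (n + 1)

theorem pvCollectA_shift (lines : List (List String)) (n : Int) :
    pvCollectA lines (n + 1) = (pvCollectA lines n).map (· + 1) := by
  induction lines generalizing n with
  | nil => rfl
  | cons r rest ih => simp only [pvCollectA]; split <;> simp [ih]

-- A's row pass collects exactly the all-"." rows, so duplicating at those indices is the flatMap form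
theorem gDupIdx_collect (xs : List (List String)) :
    gDupIdx xs (pvCollectA xs 0)
      = xs.flatMap (fun r => if r.all (fun place => place == ".") then [r, r] else [r]) := by
  induction xs with
  | nil => rfl
  | cons x t ih =>
    simp only [pvCollectA, List.flatMap_cons]
    have hsh : pvCollectA t (0 + 1) = (pvCollectA t 0).map (· + 1) := pvCollectA_shift t 0
    by_cases hx : x.all (fun place => place == ".")
    · rw [if_pos hx, if_pos hx, hsh]
      simp only [gDupIdx, List.map_cons]
      rw [map_sub_one_map_add_one]
      rw [show ((0 : Int) - 1) = (-1 : Int) by omega]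
      rw [gDupIdx_neg_cons _ _ _ (by omega : (-1 : Int) < 0), ih]
      simp
    · rw [if_neg hx, if_neg hx, hsh]
      simp only [gDupIdx]
      have h0 : (0 : Int) ∉ (pvCollectA t 0).map (· + 1) := by
        intro h
        rcases List.mem_map.mp h with ⟨m, hm, he⟩
        have := pvCollectA_nonneg t 0 m hm; omega
      rw [if_neg h0, map_sub_one_map_add_one, ih]

-- A's column pass over the materialised columns is a filter of the column indices
theorem pvCollectA_pyRange (n : Nat) : ∀ (a : Int) (g : Int → List String),
    pvCollectA ((PySem.List.pyRange a (a + (n : Int)) 1).map g) a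
      = (PySem.List.pyRange a (a + (n : Int)) 1).filter
          (fun j => (g j).all (fun place => place == ".")) := by
  induction n with
  | zero =>
    intro a g
    rw [show (a + ((0 : Nat) : Int)) = a by simp, PySem.List.pyRange_one_eq_nil (by omega)]
    rfl
  | succ m ih =>
    intro a g
    rw [PySem.List.pyRange_one_cons (by push_cast; omega : a < a + ((m + 1 : Nat) : Int))]
    rw [show (a + ((m + 1 : Nat) : Int)) = (a + 1) + ((m : Nat) : Int) by push_cast; ring]
    simp only [List.map_cons, pvCollectA, List.filter_cons]
    by_cases hc : (g a).all (fun place => place == ".")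
    · rw [if_pos hc, ih (a + 1) g]
      simp [hc]
    · rw [if_neg hc, ih (a + 1) g]
      simp [hc]

theorem headD_flatMap_dup (p : List String → Bool) (xs : List (List String)) :
    (xs.flatMap (fun r => if p r then [r, r] else [r])).headD [] = xs.headD [] := by
  cases xs with
  | nil => rfl
  | cons x t => simp only [List.flatMap_cons]; split <;> rfl

theorem all_flatMap_dup (p q : List String → Bool) (xs : List (List String)) :
    (xs.flatMap (fun r => if p r then [r, r] else [r])).all q = xs.all q := by
  induction xs with
  | nil => rfl
  | cons x t ih =>
    simp only [List.flatMap_cons, List.all_append, List.all_cons, ih]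
    split <;> simp

theorem enumerate_flatMap_dup (row : List String) : ∀ (s : Int) (idxs : List Int),
    (PySem.List.enumerate row s).flatMap (fun p => if p.1 ∈ idxs then [p.2, p.2] else [p.2])
      = gDupIdx row (idxs.map (· - s)) := by
  induction row with
  | nil =>
    intro s idxs
    simp [PySem.List.enumerate, gDupIdx]
  | cons x t ih =>
    intro s idxs
    rw [PySem.List.enumerate_cons]
    simp only [List.flatMap_cons]
    rw [ih (s + 1) idxs]
    have hm : ((0 : Int) ∈ idxs.map (· - s)) ↔ s ∈ idxs := by
      simp [List.mem_map, sub_eq_zero]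
    have hmm : (idxs.map (· - s)).map (· - 1) = idxs.map (· - (s + 1)) := by
      simp [List.map_map, Function.comp_def, sub_sub]
    simp only [gDupIdx, hm, hmm]

theorem pvExpandRowB_eq_gDupIdx (idxs : List Int) (row : List String) :
    pvExpandRowB idxs row = gDupIdx row idxs := by
  unfold pvExpandRowB
  rw [enumerate_flatMap_dup row 0 idxs]
  simp

-- B looks indices up in the frozenset; only membership matters
theorem pvExpandRowB_ofList (l : List Int) (row : List String) :
    pvExpandRowB (PySem.Set.ofList l) row = pvExpandRowB l row := by
  unfold pvExpandRowB
  congr 1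
  funext p
  simp [PySem.Set.mem_ofList]

theorem map_flatMap_dup (p : List String → Bool) (e : List String → List String)
    (xs : List (List String)) :
    (xs.flatMap (fun r => if p r then [r, r] else [r])).map e
      = xs.flatMap (fun r => if p r then [e r, e r] else [e r]) := by
  induction xs with
  | nil => rfl
  | cons x t ih =>
    simp only [List.flatMap_cons, List.map_append, ih]
    split <;> rfl

-- ===== VERDICT (by name: the statement is the Claim_ definition above) =====
theorem expand_universe_spec : Claim_equal_expand_universe := by
  intro u _ _
  show expand_universe u = expand_universe_alt u
  have hu1 : pvApplyRowDupsA u (pvCollectA u 0) 0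
      = u.flatMap (fun r => if r.all (fun place => place == ".") then [r, r] else [r]) := by
    rw [pvApplyRowDupsA_eq_gDupIdx u _ (pvCollectA_pairwise u 0) (pvCollectA_nonneg u 0),
        gDupIdx_collect]
  unfold expand_universe expand_universe_alt
  simp only [hu1, headD_flatMap_dup]
  rw [pvApplyColDupsA_map]
  -- the collected column indices are the filtered column range
  have hpred : ∀ j : Int,
      ((u.flatMap (fun r => if r.all (fun place => place == ".") then [r, r] else [r])).map
          (fun row => PySem.List.pyGetD row j "")).all (fun place => place == ".")
        = u.all (fun row => PySem.List.pyGetD row j "" == ".") := by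
    intro j
    rw [List.all_map, all_flatMap_dup]
    rfl
  have hcols : pvCollectA
      ((PySem.List.pyRange 0 (((u.headD []).length : Nat) : Int) 1).map
        (fun i => (u.flatMap (fun r => if r.all (fun place => place == ".") then [r, r] else [r])).map
          (fun row => PySem.List.pyGetD row i ""))) 0
      = (PySem.List.pyRange 0 (((u.headD []).length : Nat) : Int) 1).filter
          (fun j => u.all (fun row => PySem.List.pyGetD row j "" == ".")) := by
    have h := pvCollectA_pyRange (u.headD []).length 0
      (fun i => (u.flatMap (fun r => if r.all (fun place => place == ".") then [r, r] else [r])).map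
        (fun row => PySem.List.pyGetD row i ""))
    simp only [zero_add] at h
    rw [h]
    exact List.filter_congr (fun j _ => hpred j)
  rw [hcols]
  have hrow : ∀ row : List String,
      pvApplyRowDupsA row
          ((PySem.List.pyRange 0 (((u.headD []).length : Nat) : Int) 1).filter
            (fun j => u.all (fun row => PySem.List.pyGetD row j "" == "."))) 0
        = pvExpandRowB (PySem.Set.ofList
            ((PySem.List.pyRange 0 (((u.headD []).length : Nat) : Int) 1).filter
              (fun j => u.all (fun row => PySem.List.pyGetD row j "" == ".")))) row := by
    intro row
    rw [pvApplyRowDupsA_eq_gDupIdx row _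
        (List.Pairwise.filter _ (PySem.List.pairwise_lt_pyRange_one 0 (((u.headD []).length : Nat) : Int)))
        (fun k hk => by
          have h1 := (List.mem_filter.mp hk).1
          have h2 := (PySem.List.mem_pyRange_one.mp h1).1
          omega),
      ← pvExpandRowB_eq_gDupIdx, ← pvExpandRowB_ofList]
  simp only [hrow]
  exact map_flatMap_dup _ _ u
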